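-- pv_equiv track=rewrite | github.com/gaboza12/we-are-algorithm | 724thomas/Week7 DynamicProgramming1/17291.py | solution
-- ===== SOURCE A (Python) =====
-- from collections import defaultdict
--
-- def solution(n):
--     dies = defaultdict(int)
--     dies[4] = 1
--     bugs = 1
--     for year in range(2, n + 1):
--         dies[year + 4 - year % 2] += bugs
--         bugs = (bugs * 2) - dies[year]
--     return bugs
-- ===== SOURCE B (Python) =====
-- def _mat_mul(a, b):
--     return tuple(
--         tuple(sum(a[i][k] * b[k][j] for k in range(5)) for j in range(5))
--         for i in range(5)
--     )
--
--
-- def _mat_vec(m, v):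
--     return tuple(sum(m[i][k] * v[k] for k in range(5)) for i in range(5))
--
--
-- def _mat_pow(m, e):
--     r = tuple(tuple(int(i == j) for j in range(5)) for i in range(5))
--     while e:
--         if e & 1:
--             r = _mat_mul(r, m)
--         m = _mat_mul(m, m)
--         e >>= 1
--     return r
--
--
-- # One-year transition on the state (b[y], b[y-1], b[y-2], b[y-3], b[y-4]):
-- # odd target year:  b[y+1] = 2*b[y]
-- # even target year: b[y+1] = 2*b[y] - b[y-3] - b[y-4]
-- _SHIFT = ((1, 0, 0, 0, 0), (0, 1, 0, 0, 0), (0, 0, 1, 0, 0), (0, 0, 0, 1, 0))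
-- _O = ((2, 0, 0, 0, 0),) + _SHIFT
-- _E = ((2, 0, 0, -1, -1),) + _SHIFT
-- _P = _mat_mul(_E, _O)  # two years: odd target then even target
--
--
-- def solution(n):
--     if n <= 1:
--         return 1
--     if n <= 4:
--         return (2, 4, 7)[n - 2]
--     q, r = divmod(n - 4, 2)
--     v = _mat_vec(_mat_pow(_P, q), (7, 4, 2, 1, 1))  # state at year 4 + 2*q
--     if r == 1:
--         v = _mat_vec(_O, v)  # n is odd: one more odd-year step
--     return v[0]
-- ===== Notes on version B (the rewrite author's own statement) =====
-- stated objective: faster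
-- what changed: A simulates the population year by year with a defaultdict of scheduled deaths; B turns the recurrence into a fixed 5-state linear map and computes the n-th state by binary matrix exponentiation (plus a small-n table), doing O(log n) matrix multiplications instead of O(n) loop iterations.
import Mathlib
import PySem

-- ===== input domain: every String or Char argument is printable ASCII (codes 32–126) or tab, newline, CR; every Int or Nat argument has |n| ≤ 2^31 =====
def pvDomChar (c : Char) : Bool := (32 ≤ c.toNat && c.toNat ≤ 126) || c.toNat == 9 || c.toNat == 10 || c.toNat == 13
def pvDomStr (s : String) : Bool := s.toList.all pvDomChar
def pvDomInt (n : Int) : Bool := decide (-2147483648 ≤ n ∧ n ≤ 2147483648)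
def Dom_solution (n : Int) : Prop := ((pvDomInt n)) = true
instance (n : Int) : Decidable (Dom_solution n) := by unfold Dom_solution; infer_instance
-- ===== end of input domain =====

-- B replaces A's O(n) year-by-year defaultdict simulation by binary exponentiation of a
-- fixed 5-state linear recurrence (O(log n) matrix multiplications); return values are equal.

-- ===== PORT A =====
-- one iteration of A's loop: dies[year + 4 - year % 2] += bugs; bugs = bugs*2 - dies[year]
def solStep (st : PySem.Dict Int Int × Int) (year : Int) : PySem.Dict Int Int × Int :=
  let dies := st.1
  let bugs := st.2
  let key := year + 4 - PySem.Int.mod year 2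
  let dies' := dies.insert key (dies.getD key 0 + bugs)
  (dies', bugs * 2 - dies'.getD year 0)

def solution (n : Int) : Int :=
  ((PySem.List.pyRange 2 (n + 1) 1).foldl solStep (PySem.Dict.empty.insert 4 1, 1)).2

-- ===== PORT B =====
abbrev Vec5 := Int × Int × Int × Int × Int
abbrev Mat5 := Vec5 × Vec5 × Vec5 × Vec5 × Vec5

def dot5 (a v : Vec5) : Int :=
  a.1 * v.1 + a.2.1 * v.2.1 + a.2.2.1 * v.2.2.1 + a.2.2.2.1 * v.2.2.2.1 + a.2.2.2.2 * v.2.2.2.2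

def matVec (m : Mat5) (v : Vec5) : Vec5 :=
  (dot5 m.1 v, dot5 m.2.1 v, dot5 m.2.2.1 v, dot5 m.2.2.2.1 v, dot5 m.2.2.2.2 v)

def col1 (m : Mat5) : Vec5 := (m.1.1, m.2.1.1, m.2.2.1.1, m.2.2.2.1.1, m.2.2.2.2.1)
def col2 (m : Mat5) : Vec5 := (m.1.2.1, m.2.1.2.1, m.2.2.1.2.1, m.2.2.2.1.2.1, m.2.2.2.2.2.1)
def col3 (m : Mat5) : Vec5 := (m.1.2.2.1, m.2.1.2.2.1, m.2.2.1.2.2.1, m.2.2.2.1.2.2.1, m.2.2.2.2.2.2.1)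
def col4 (m : Mat5) : Vec5 := (m.1.2.2.2.1, m.2.1.2.2.2.1, m.2.2.1.2.2.2.1, m.2.2.2.1.2.2.2.1, m.2.2.2.2.2.2.2.1)
def col5 (m : Mat5) : Vec5 := (m.1.2.2.2.2, m.2.1.2.2.2.2, m.2.2.1.2.2.2.2, m.2.2.2.1.2.2.2.2, m.2.2.2.2.2.2.2.2)

def rowMul (r : Vec5) (m : Mat5) : Vec5 :=
  (dot5 r (col1 m), dot5 r (col2 m), dot5 r (col3 m), dot5 r (col4 m), dot5 r (col5 m))

def matMul (a b : Mat5) : Mat5 :=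
  (rowMul a.1 b, rowMul a.2.1 b, rowMul a.2.2.1 b, rowMul a.2.2.2.1 b, rowMul a.2.2.2.2 b)

def idMat : Mat5 := ((1,0,0,0,0),(0,1,0,0,0),(0,0,1,0,0),(0,0,0,1,0),(0,0,0,0,1))

-- Source B's while-loop of _mat_pow (e&1 test, square, e >>= 1)
def matPowLoop (r m : Mat5) (e : Nat) : Mat5 :=
  if e = 0 then r
  else matPowLoop (if e % 2 = 1 then matMul r m else r) (matMul m m) (e / 2)
termination_by e
decreasing_by omega

def matPow (m : Mat5) (e : Nat) : Mat5 := matPowLoop idMat m e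

def matO : Mat5 := ((2,0,0,0,0),(1,0,0,0,0),(0,1,0,0,0),(0,0,1,0,0),(0,0,0,1,0))
def matE : Mat5 := ((2,0,0,-1,-1),(1,0,0,0,0),(0,1,0,0,0),(0,0,1,0,0),(0,0,0,1,0))
def matP : Mat5 := matMul matE matO

def solution_alt (n : Int) : Int :=
  if n ≤ 1 then 1
  else if n ≤ 4 then (if n = 2 then 2 else if n = 3 then 4 else 7)
  else
    let q := PySem.Int.floordiv (n - 4) 2
    let r := PySem.Int.mod (n - 4) 2
    let v := matVec (matPow matP q.toNat) (7, 4, 2, 1, 1)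
    let v' := if r = 1 then matVec matO v else v
    v'.1

-- ===== PRECONDITION & SPEC =====
def Spec_solution (n : Int) (out : Int) : Prop := out = solution_alt n
instance (n : Int) (out : Int) : Decidable (Spec_solution n out) := by unfold Spec_solution; infer_instance

-- ===== CLAIM (what is proved, stated in full; the proofs are below) =====
def Claim_equal_solution : Prop := ∀ (n : Int), Dom_solution n → Spec_solution n (solution n)

-- ===== LEMMAS AND PROOFS =====

-- Specification-side sequence: bstate j = (b (j+1), b j, b (j-1), b (j-2), b (j-3)) where b y is
-- the bug count after year y, with the "virtual" pre-history b 1 = b 0 = 1, b (-1) = b (-2) = b (-3) = 0.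
def nextState (year : Int) (v : Vec5) : Vec5 :=
  (2 * v.1 - (if year % 2 = 0 then v.2.2.2.1 + v.2.2.2.2 else 0), v.1, v.2.1, v.2.2.1, v.2.2.2.1)

def bstate : Nat → Vec5
  | 0 => (1, 1, 0, 0, 0)
  | j + 1 => nextState ((j : Int) + 2) (bstate j)

def bb (y : Nat) : Int := (bstate (y - 1)).1

-- the value A's dies dict holds at key k after processing years 2..y
def Winv (y k : Int) : Int :=
  (if k = 4 then 1 else 0)
  + (if k % 2 = 0 ∧ 2 ≤ k - 4 ∧ k - 4 ≤ y then bb (k - 5).toNat else 0)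
  + (if k % 2 = 0 ∧ 2 ≤ k - 3 ∧ k - 3 ≤ y then bb (k - 4).toNat else 0)

lemma bstate_c4 (j : Nat) (h : 3 ≤ j) : (bstate j).2.2.2.1 = bb (j - 2) := by
  obtain ⟨j', rfl⟩ : ∃ j'', j = j'' + 3 := ⟨j - 3, by omega⟩
  rfl

lemma bstate_c5 (j : Nat) (h : 4 ≤ j) : (bstate j).2.2.2.2 = bb (j - 3) := by
  obtain ⟨j', rfl⟩ : ∃ j'', j = j'' + 4 := ⟨j - 4, by omega⟩
  rfl

lemma bb_step (j : Nat) (hj : 1 ≤ j) :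
    bb (j + 1) = 2 * bb j - Winv (j : Int) ((j : Int) + 1) := by
  obtain ⟨j', rfl⟩ : ∃ t, j = t + 1 := ⟨j - 1, by omega⟩
  have h1 : bb (j' + 1 + 1)
      = 2 * bb (j' + 1) - (if ((j' : Int) + 2) % 2 = 0
          then (bstate j').2.2.2.1 + (bstate j').2.2.2.2 else 0) := rfl
  rw [h1]
  congr 1
  by_cases hp : ((j' : Int) + 2) % 2 = 0
  · rw [if_pos hp]
    rcases (by omega : j' = 0 ∨ j' = 2 ∨ 4 ≤ j') with h0 | h2 | h4
    · subst h0; decide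
    · subst h2; decide
    · rw [bstate_c4 j' (by omega), bstate_c5 j' (by omega)]
      unfold Winv
      have e1 : (((j' + 1 : Nat) : Int) + 1 - 5).toNat = j' - 3 := by omega
      have e2 : (((j' + 1 : Nat) : Int) + 1 - 4).toNat = j' - 2 := by omega
      rw [e1, e2]
      split_ifs <;> omega
  · rw [if_neg hp]
    unfold Winv
    split_ifs <;> omega

lemma Winv_succ (j : Nat) (hj : 1 ≤ j) (k : Int) :
    Winv ((j : Int) + 1) k =
      if k = (j : Int) + 1 + 4 - ((j : Int) + 1) % 2 then Winv (j : Int) k + bb j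
      else Winv (j : Int) k := by
  rcases Nat.mod_two_eq_zero_or_one j with hp | hp
  · have hkey : (j : Int) + 1 + 4 - ((j : Int) + 1) % 2 = (j : Int) + 4 := by omega
    rw [hkey]
    by_cases hk : k = (j : Int) + 4
    · subst hk
      rw [if_pos rfl]
      unfold Winv
      have e1 : ((j : Int) + 4 - 5).toNat = j - 1 := by omega
      have e2 : ((j : Int) + 4 - 4).toNat = j := by omega
      rw [e1, e2]
      split_ifs <;> omega
    · rw [if_neg hk]
      unfold Winv
      split_ifs <;> omega
  · have hkey : (j : Int) + 1 + 4 - ((j : Int) + 1) % 2 = (j : Int) + 5 := by omega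
    rw [hkey]
    by_cases hk : k = (j : Int) + 5
    · subst hk
      rw [if_pos rfl]
      unfold Winv
      have e1 : ((j : Int) + 5 - 5).toNat = j := by omega
      have e2 : ((j : Int) + 5 - 4).toNat = j + 1 := by omega
      rw [e1, e2]
      split_ifs <;> omega
    · rw [if_neg hk]
      unfold Winv
      split_ifs <;> omega

lemma loopA (j : Nat) (hj : 1 ≤ j) :
    (((PySem.List.pyRange 2 ((j : Int) + 1) 1).foldl solStep (PySem.Dict.empty.insert 4 1, 1)).2 = bb j)
    ∧ ∀ k : Int,
      (((PySem.List.pyRange 2 ((j : Int) + 1) 1).foldl solStep (PySem.Dict.empty.insert 4 1, 1)).1).getD k 0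
        = Winv (j : Int) k := by
  induction j, hj using Nat.le_induction with
  | base =>
      rw [show ((1 : Nat) : Int) + 1 = 2 by norm_num,
        PySem.List.pyRange_one_eq_nil (le_refl 2)]
      refine ⟨rfl, fun k => ?_⟩
      show (PySem.Dict.empty.insert 4 1).getD k 0 = Winv 1 k
      rw [PySem.Dict.getD_insert]
      unfold Winv
      split_ifs <;> simp_all <;> omega
  | succ j hj ih =>
      obtain ⟨ih1, ih2⟩ := ih
      have hcast : ((j + 1 : Nat) : Int) + 1 = ((j : Int) + 1) + 1 := by push_cast; ring
      rw [hcast, PySem.List.pyRange_one_succ_right (by omega : (2 : Int) ≤ (j : Int) + 1),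
        List.foldl_append, List.foldl_cons, List.foldl_nil]
      set st := (PySem.List.pyRange 2 ((j : Int) + 1) 1).foldl solStep
        (PySem.Dict.empty.insert 4 1, 1) with hst
      have hsol : solStep st ((j : Int) + 1) =
          (st.1.insert ((j : Int) + 1 + 4 - ((j : Int) + 1) % 2)
            (st.1.getD ((j : Int) + 1 + 4 - ((j : Int) + 1) % 2) 0 + st.2),
           st.2 * 2 - (st.1.insert ((j : Int) + 1 + 4 - ((j : Int) + 1) % 2)
            (st.1.getD ((j : Int) + 1 + 4 - ((j : Int) + 1) % 2) 0 + st.2)).getD ((j : Int) + 1) 0) := by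
        simp only [solStep, PySem.Int.mod_eq_emod_of_pos (by norm_num : (0 : Int) < 2)]
      rw [hsol]
      have hne : (j : Int) + 1 ≠ (j : Int) + 1 + 4 - ((j : Int) + 1) % 2 := by omega
      constructor
      · show st.2 * 2 - _ = bb (j + 1)
        rw [PySem.Dict.getD_insert, if_neg hne, ih2, ih1, bb_step j hj]
        ring
      · intro k
        show (st.1.insert _ _).getD k 0 = Winv ((j + 1 : Nat) : Int) k
        rw [PySem.Dict.getD_insert, ih2, ih2, ih1,
          show ((j + 1 : Nat) : Int) = (j : Int) + 1 by push_cast; ring,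
          Winv_succ j hj k]
        split_ifs with h
        · rw [h]
        · rfl

-- B-side machinery
def ipow (m : Mat5) : Nat → Mat5
  | 0 => idMat
  | k + 1 => matMul (ipow m k) m

lemma matVec_mul (a b : Mat5) (v : Vec5) : matVec (matMul a b) v = matVec a (matVec b v) := by
  obtain ⟨⟨a11,a12,a13,a14,a15⟩,⟨a21,a22,a23,a24,a25⟩,⟨a31,a32,a33,a34,a35⟩,⟨a41,a42,a43,a44,a45⟩,⟨a51,a52,a53,a54,a55⟩⟩ := a
  obtain ⟨⟨b11,b12,b13,b14,b15⟩,⟨b21,b22,b23,b24,b25⟩,⟨b31,b32,b33,b34,b35⟩,⟨b41,b42,b43,b44,b45⟩,⟨b51,b52,b53,b54,b55⟩⟩ := b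
  obtain ⟨v1,v2,v3,v4,v5⟩ := v
  simp only [matVec, matMul, rowMul, dot5, col1, col2, col3, col4, col5, Prod.mk.injEq]
  and_intros <;> ring

lemma matMul_assoc (a b c : Mat5) : matMul (matMul a b) c = matMul a (matMul b c) := by
  obtain ⟨⟨a11,a12,a13,a14,a15⟩,⟨a21,a22,a23,a24,a25⟩,⟨a31,a32,a33,a34,a35⟩,⟨a41,a42,a43,a44,a45⟩,⟨a51,a52,a53,a54,a55⟩⟩ := a
  obtain ⟨⟨b11,b12,b13,b14,b15⟩,⟨b21,b22,b23,b24,b25⟩,⟨b31,b32,b33,b34,b35⟩,⟨b41,b42,b43,b44,b45⟩,⟨b51,b52,b53,b54,b55⟩⟩ := b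
  obtain ⟨⟨c11,c12,c13,c14,c15⟩,⟨c21,c22,c23,c24,c25⟩,⟨c31,c32,c33,c34,c35⟩,⟨c41,c42,c43,c44,c45⟩,⟨c51,c52,c53,c54,c55⟩⟩ := c
  simp only [matMul, rowMul, dot5, col1, col2, col3, col4, col5, Prod.mk.injEq]
  and_intros <;> ring

lemma matMul_id (m : Mat5) : matMul m idMat = m := by
  obtain ⟨⟨a11,a12,a13,a14,a15⟩,⟨a21,a22,a23,a24,a25⟩,⟨a31,a32,a33,a34,a35⟩,⟨a41,a42,a43,a44,a45⟩,⟨a51,a52,a53,a54,a55⟩⟩ := m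
  simp only [matMul, rowMul, dot5, col1, col2, col3, col4, col5, idMat, Prod.mk.injEq]
  and_intros <;> ring

lemma id_matMul (m : Mat5) : matMul idMat m = m := by
  obtain ⟨⟨a11,a12,a13,a14,a15⟩,⟨a21,a22,a23,a24,a25⟩,⟨a31,a32,a33,a34,a35⟩,⟨a41,a42,a43,a44,a45⟩,⟨a51,a52,a53,a54,a55⟩⟩ := m
  simp only [matMul, rowMul, dot5, col1, col2, col3, col4, col5, idMat, Prod.mk.injEq]
  and_intros <;> ring

lemma ipow_sq (m : Mat5) (t : Nat) : ipow (matMul m m) t = ipow m (2 * t) := by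
  induction t with
  | zero => rfl
  | succ t ih =>
      have h2 : 2 * (t + 1) = 2 * t + 1 + 1 := by omega
      rw [h2]
      show matMul (ipow (matMul m m) t) (matMul m m) = ipow m (2 * t + 1 + 1)
      rw [ih, ← matMul_assoc]
      rfl

lemma mul_ipow (m : Mat5) (k : Nat) : matMul m (ipow m k) = ipow m (k + 1) := by
  induction k with
  | zero => rw [show ipow m 0 = idMat from rfl, matMul_id, show ipow m 1 = matMul idMat m from rfl, id_matMul]
  | succ k ih =>
      show matMul m (matMul (ipow m k) m) = matMul (ipow m (k + 1)) m
      rw [← matMul_assoc, ih]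

lemma matPowLoop_eq (e : Nat) : ∀ r m : Mat5, matPowLoop r m e = matMul r (ipow m e) := by
  induction e using Nat.strong_induction_on with
  | _ e ih =>
    intro r m
    by_cases he : e = 0
    · subst he; rw [matPowLoop]; simp [matMul_id, ipow]
    · rw [matPowLoop]
      rw [if_neg he]
      rw [ih (e / 2) (by omega), ipow_sq]
      by_cases hp : e % 2 = 1
      · rw [if_pos hp, show 2 * (e / 2) = e - 1 by omega, matMul_assoc, mul_ipow,
          show e - 1 + 1 = e by omega]
      · rw [if_neg hp, show 2 * (e / 2) = e by omega]

lemma matPow_eq (m : Mat5) (e : Nat) : matPow m e = ipow m e := by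
  rw [matPow, matPowLoop_eq, id_matMul]

lemma step_even (j : Nat) (h : j % 2 = 0) : matVec matE (bstate j) = bstate (j + 1) := by
  show matVec matE (bstate j) = nextState ((j : Int) + 2) (bstate j)
  obtain ⟨v1, v2, v3, v4, v5⟩ := bstate j
  have hp : ((j : Int) + 2) % 2 = 0 := by omega
  simp only [matVec, dot5, matE, nextState, hp, if_true, Prod.mk.injEq]
  and_intros <;> ring

lemma step_odd (j : Nat) (h : j % 2 = 1) : matVec matO (bstate j) = bstate (j + 1) := by
  show matVec matO (bstate j) = nextState ((j : Int) + 2) (bstate j)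
  obtain ⟨v1, v2, v3, v4, v5⟩ := bstate j
  have hp : ¬ ((j : Int) + 2) % 2 = 0 := by omega
  simp only [matVec, dot5, matO, nextState, hp, if_false, Prod.mk.injEq]
  and_intros <;> ring

lemma step_P (j : Nat) (h : j % 2 = 1) : matVec matP (bstate j) = bstate (j + 2) := by
  rw [matP, matVec_mul, step_odd j h, step_even (j + 1) (by omega)]

lemma pow_P (q : Nat) : ∀ j : Nat, j % 2 = 1 →
    matVec (ipow matP q) (bstate j) = bstate (j + 2 * q) := by
  induction q with
  | zero =>
      intro j _
      obtain ⟨v1, v2, v3, v4, v5⟩ := bstate j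
      simp [ipow, idMat, matVec, dot5]
  | succ q ih =>
      intro j hj
      show matVec (matMul (ipow matP q) matP) (bstate j) = _
      rw [matVec_mul, step_P j hj, ih (j + 2) (by omega), show j + 2 + 2 * q = j + 2 * (q + 1) by omega]

-- ===== VERDICT (by name: the statement is the Claim_ definition above) =====
theorem solution_spec : Claim_equal_solution := by
  intro n _
  unfold Spec_solution
  show solution n = solution_alt n
  by_cases h1 : n ≤ 1
  · unfold solution solution_alt
    rw [PySem.List.pyRange_one_eq_nil (by omega : n + 1 ≤ 2), if_pos h1]
    rfl
  · have hb := (loopA n.toNat (by omega)).1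
    have hsol : solution n = bb n.toNat := by
      unfold solution
      rw [show n + 1 = ((n.toNat : Int)) + 1 by omega]
      exact hb
    rw [hsol]
    by_cases h4 : n ≤ 4
    · rcases (by omega : n = 2 ∨ n = 3 ∨ n = 4) with rfl | rfl | rfl <;> decide
    · simp only [solution_alt, if_neg h1, if_neg h4,
        PySem.Int.floordiv_eq_ediv_of_pos (by norm_num : (0 : Int) < 2),
        PySem.Int.mod_eq_emod_of_pos (by norm_num : (0 : Int) < 2)]
      rw [show ((7 : Int), (4 : Int), (2 : Int), (1 : Int), (1 : Int)) = bstate 3 by decide,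
        matPow_eq, pow_P ((n - 4) / 2).toNat 3 (by norm_num)]
      by_cases hpar : (n - 4) % 2 = 1
      · rw [if_pos hpar,
          show 3 + 2 * ((n - 4) / 2).toNat = n.toNat - 2 by omega,
          step_odd (n.toNat - 2) (by omega),
          show n.toNat - 2 + 1 = n.toNat - 1 by omega]
        rfl
      · rw [if_neg hpar,
          show 3 + 2 * ((n - 4) / 2).toNat = n.toNat - 1 by omega]
        rfl
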